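-- pv_equiv track=rewrite | github.com/entwanne/horaires_trains | train_schedule/sort.py | normalize_distances
-- ===== SOURCE A (Python) =====
-- def normalize_distances(distances):
--     """
--     Normalize a distances dict
--     Re-compute the distances to make them absolute from departure.arrival
--
--     normalize_distances({
--         'viridian': (0, 0, None),
--         'pewter': (10, 1, 'viridian'),
--         'cerulean': (30, 1, 'pewter'),
--     })
--     => {
--         'viridian': (0, 0, None),
--         'pewter': (10, 1, None),
--         'cerulean': (40, 2, None),
--     }
--     """
--     def set_absolute_dist(stop):
--         # Walk recursively through stops to update min_dist & n_stops
--         dist, n, src = distances[stop]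
--
--         if src is not None:
--             d, i, src = set_absolute_dist(src)
--             dist += d
--             n += i
--             distances[stop] = dist, n, src
--
--         return dist, n, src
--
--     for stop in list(distances):
--         set_absolute_dist(stop)
--
--     return distances
-- ===== SOURCE B (Python) =====
-- def normalize_distances(distances):
--     # Iterative re-implementation: for each non-root stop, walk its parent
--     # chain in a read-only snapshot summing distances/stop counts, then write
--     # the absolute tuple back.  Mutates `distances` in place like the original.
--     orig = dict(distances)
--     for stop, (dist, n, src) in orig.items():
--         if src is not None:
--             cur = src
--             while cur is not None:
--                 d, i, cur = orig[cur]
--                 dist += d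
--                 n += i
--             distances[stop] = (dist, n, None)
--     return distances
-- ===== Notes on version B (the rewrite author's own statement) =====
-- stated objective: alternative
-- what changed: The recursive memoizing helper (which rewrites every ancestor while recursing) is replaced by a flat loop that, for each non-root stop, iteratively walks its parent chain in a read-only snapshot and sums the distances, writing each stop exactly once.
import Mathlib
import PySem

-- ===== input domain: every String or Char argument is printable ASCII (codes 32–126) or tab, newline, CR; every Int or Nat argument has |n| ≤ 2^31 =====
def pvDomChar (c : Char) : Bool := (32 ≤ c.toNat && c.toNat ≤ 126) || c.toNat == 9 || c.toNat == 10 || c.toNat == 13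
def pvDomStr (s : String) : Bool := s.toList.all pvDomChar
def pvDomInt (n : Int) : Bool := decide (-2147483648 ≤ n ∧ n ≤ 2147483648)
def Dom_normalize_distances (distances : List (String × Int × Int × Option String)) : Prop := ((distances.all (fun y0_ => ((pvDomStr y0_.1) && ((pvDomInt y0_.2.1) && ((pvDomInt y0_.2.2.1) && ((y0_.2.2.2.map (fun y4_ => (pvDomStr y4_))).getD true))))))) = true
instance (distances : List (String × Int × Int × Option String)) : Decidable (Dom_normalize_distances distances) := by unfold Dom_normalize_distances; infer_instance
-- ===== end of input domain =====

-- B replaces A's recursive memoizing helper by a flat iterative walk over a read-only snapshot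
-- (alternative decomposition, not faster); both Pythons mutate the argument dict in place and
-- return it — the equivalence proved here is about the returned value.

-- ===== PORT A =====
-- set_absolute_dist: recursion ported with fuel; fuel 0 / missing key are the cases where the
-- Python raises (RecursionError / KeyError) — unreachable under Pre_.
def setAbsDist (fuel : Nat) (d : PySem.Dict String (Int × Int × Option String)) (stop : String) :
    PySem.Dict String (Int × Int × Option String) × (Int × Int × Option String) :=
  match fuel with
  | 0 => (d, (0, 0, none))
  | fuel + 1 =>
    match d.get? stop with
    | none => (d, (0, 0, none))
    | some (dist, n, src) =>
      match src with
      | none => (d, (dist, n, none))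
      | some s =>
        let r := setAbsDist fuel d s
        let dist' := dist + r.2.1
        let n' := n + r.2.2.1
        (r.1.insert stop (dist', n', r.2.2.2), (dist', n', r.2.2.2))

def normalize_distances (distances : List (String × Int × Int × Option String)) :
    List (String × Int × Int × Option String) :=
  let d0 := PySem.Dict.mk distances
  let d := d0.keys.foldl (fun d stop => (setAbsDist (distances.length + 1) d stop).1) d0
  d.items

-- ===== PORT B =====
-- the `while cur is not None` walk of Source B; fuel 0 / missing key are where the Python
-- loops forever / raises KeyError — unreachable under Pre_.
def chainWalk (orig : List (String × Int × Int × Option String)) :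
    Nat → Int → Int → Option String → Int × Int
  | _, dist, n, none => (dist, n)
  | 0, dist, n, some _ => (dist, n)
  | fuel + 1, dist, n, some c =>
    match orig.find? (fun e => e.1 == c) with
    | none => (dist, n)
    | some e => chainWalk orig fuel (dist + e.2.1) (n + e.2.2.1) e.2.2.2

def normalize_distances_alt (distances : List (String × Int × Int × Option String)) :
    List (String × Int × Int × Option String) :=
  distances.map (fun e =>
    match e.2.2.2 with
    | none => e
    | some _ =>
      let r := chainWalk distances distances.length e.2.1 e.2.2.1 e.2.2.2
      (e.1, r.1, r.2, none))

-- ===== PRECONDITION & SPEC =====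
-- Graph-shape condition on the input (not a re-run of either port: it follows the `src`
-- pointers only, computing nothing): the parent chain starting at `cur` reaches a root
-- (src = None) within `fuel` steps.  With fuel = length this says exactly that every parent
-- key exists and the parent links are acyclic.
def rootedChain (L : List (String × Int × Int × Option String)) : Nat → Option String → Bool
  | _, none => true
  | 0, some _ => false
  | fuel + 1, some c =>
    match L.find? (fun e => e.1 == c) with
    | none => false
    | some e => rootedChain L fuel e.2.2.2

-- Pre_ excludes: duplicate keys (impossible in the Python dict A receives — the association-list
-- encoding is ambiguous there), and parent chains that hit a missing key or a cycle, on which A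
-- raises KeyError / RecursionError.
def Pre_normalize_distances (distances : List (String × Int × Int × Option String)) : Prop :=
  (distances.map (·.1)).Nodup ∧
  distances.all (fun e => rootedChain distances distances.length e.2.2.2) = true
instance (distances : List (String × Int × Int × Option String)) :
    Decidable (Pre_normalize_distances distances) := by unfold Pre_normalize_distances; infer_instance

def pvWitness_normalize_distances : (List (String × Int × Int × Option String)) :=
  [("viridian", 0, 0, none), ("pewter", 10, 1, some "viridian"), ("cerulean", 30, 1, some "pewter")]

def Spec_normalize_distances (distances : List (String × Int × Int × Option String))
    (out : List (String × Int × Int × Option String)) : Prop := out = normalize_distances_alt distances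
instance (distances : List (String × Int × Int × Option String))
    (out : List (String × Int × Int × Option String)) :
    Decidable (Spec_normalize_distances distances out) := by unfold Spec_normalize_distances; infer_instance

-- ===== CLAIM (what is proved, stated in full; the proofs are below) =====
def Claim_equal_normalize_distances : Prop :=
  ∀ (distances : List (String × Int × Int × Option String)), Dom_normalize_distances distances →
    Pre_normalize_distances distances →
    Spec_normalize_distances distances (normalize_distances distances)

-- ===== LEMMAS AND PROOFS =====

-- absolute (distance, stops) accumulated along the parent chain from `s` in dict `d`;
-- none = the chain does not resolve within the fuel
def chaseO (d : PySem.Dict String (Int × Int × Option String)) : Nat → Option String → Option (Int × Int)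
  | _, none => some (0, 0)
  | 0, some _ => none
  | f + 1, some k =>
    match d.get? k with
    | none => none
    | some v => (chaseO d f v.2.2).map (fun p => (v.1 + p.1, v.2.1 + p.2))

-- loop invariant of A: keys unchanged, and every key's absolute value (w.r.t. the current,
-- partially rewritten dict) still equals its absolute value A0 in the original dict
def InvA (keys0 : List String) (A0 : String → Option (Int × Int)) (len : Nat)
    (d : PySem.Dict String (Int × Int × Option String)) : Prop :=
  d.keys = keys0 ∧ ∀ k ∈ keys0, ∃ v, A0 k = some v ∧ chaseO d (len + 1) (some k) = some v

theorem chase_mono (d : PySem.Dict String (Int × Int × Option String)) :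
    ∀ f g s v, chaseO d f s = some v → f ≤ g → chaseO d g s = some v := by
  intro f
  induction f with
  | zero =>
    intro g s v h _
    cases s with
    | none => cases g <;> simpa [chaseO] using h
    | some k => simp [chaseO] at h
  | succ f ih =>
    intro g s v h hle
    cases s with
    | none => cases g <;> simpa [chaseO] using h
    | some k =>
      obtain ⟨g', rfl⟩ : ∃ g', g = g' + 1 := ⟨g - 1, by omega⟩
      simp only [chaseO] at h ⊢
      cases hk : d.get? k with
      | none => simp [hk] at h
      | some val =>
        simp only [hk, Option.map_eq_some_iff] at h ⊢
        obtain ⟨p, hp, rfl⟩ := h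
        exact ⟨p, ih g' val.2.2 p hp (by omega), rfl⟩

theorem chase_unique (d : PySem.Dict String (Int × Int × Option String)) {f g s v w}
    (hv : chaseO d f s = some v) (hw : chaseO d g s = some w) : v = w := by
  have h1 := chase_mono d f (f + g) s v hv (by omega)
  have h2 := chase_mono d g (f + g) s w hw (by omega)
  rw [h1] at h2; exact Option.some_inj.mp h2

theorem get?_mk_find (L : List (String × Int × Int × Option String)) (k : String) :
    (PySem.Dict.mk L).get? k = (L.find? (fun e => e.1 == k)).map (·.2) := by
  induction L with
  | nil => simp [PySem.Dict.get?]
  | cons e rest ih =>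
    obtain ⟨k1, v1⟩ := e
    rw [PySem.Dict.get?_mk_cons]
    cases h : (k1 == k) <;> simp [h, ih]

theorem find?_of_nodup (L : List (String × Int × Int × Option String))
    (hnd : (L.map (·.1)).Nodup) {e} (he : e ∈ L) :
    L.find? (fun f => f.1 == e.1) = some e := by
  induction L with
  | nil => simp at he
  | cons a rest ih =>
    simp only [List.map_cons, List.nodup_cons] at hnd
    rcases List.mem_cons.mp he with rfl | hmem
    · simp
    · have hne : (a.1 == e.1) = false := by
        simp only [beq_eq_false_iff_ne, ne_eq]
        intro hEq
        exact hnd.1 (hEq ▸ List.mem_map_of_mem hmem)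
      simp [hne, ih hnd.2 hmem]

theorem rooted_chase (L : List (String × Int × Int × Option String)) :
    ∀ f s, rootedChain L f s = true → ∃ w, chaseO (PySem.Dict.mk L) f s = some w := by
  intro f
  induction f with
  | zero =>
    intro s h
    cases s with
    | none => exact ⟨(0, 0), rfl⟩
    | some c => simp [rootedChain] at h
  | succ f ih =>
    intro s h
    cases s with
    | none => exact ⟨(0, 0), rfl⟩
    | some c =>
      simp only [rootedChain] at h
      cases hf : L.find? (fun e => e.1 == c) with
      | none => rw [hf] at h; simp at h
      | some e =>
        rw [hf] at h
        obtain ⟨w, hw⟩ := ih e.2.2.2 h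
        refine ⟨(e.2.1 + w.1, e.2.2.1 + w.2), ?_⟩
        simp [chaseO, get?_mk_find, hf, hw]

theorem walk_chase (L : List (String × Int × Int × Option String)) :
    ∀ f s w a b, chaseO (PySem.Dict.mk L) f s = some w →
      chainWalk L f a b s = (a + w.1, b + w.2) := by
  intro f
  induction f with
  | zero =>
    intro s w a b h
    cases s with
    | none => simp only [chaseO, Option.some_inj] at h; simp [chainWalk, ← h]
    | some c => simp [chaseO] at h
  | succ f ih =>
    intro s w a b h
    cases s with
    | none => simp only [chaseO, Option.some_inj] at h; simp [chainWalk, ← h]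
    | some c =>
      simp only [chaseO, get?_mk_find L c] at h
      cases hf : L.find? (fun e => e.1 == c) with
      | none => rw [hf] at h; simp at h
      | some e =>
        rw [hf] at h
        simp only [Option.map_some, Option.map_eq_some_iff] at h
        obtain ⟨p, hp, rfl⟩ := h
        simp only [chainWalk, hf]
        rw [ih e.2.2.2 p (a + e.2.1) (b + e.2.2.1) hp]
        simp only [Prod.mk.injEq]
        constructor <;> ring

theorem chase_insert (d : PySem.Dict String (Int × Int × Option String)) {stop : String}
    {val : Int × Int × Option String} {g : Nat} {w : Int × Int}
    (hstop : d.get? stop = some val) (hw : chaseO d g val.2.2 = some w) :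
    ∀ f s v, chaseO d f s = some v →
      chaseO (d.insert stop (val.1 + w.1, val.2.1 + w.2, none)) f s = some v := by
  intro f
  induction f with
  | zero =>
    intro s v h
    cases s with
    | none => exact h
    | some k => simp [chaseO] at h
  | succ f ih =>
    intro s v h
    cases s with
    | none => exact h
    | some k =>
      simp only [chaseO] at h ⊢
      by_cases hk : k = stop
      · subst hk
        rw [hstop] at h
        rw [PySem.Dict.get?_insert_self]
        simp only [Option.map_eq_some_iff] at h
        obtain ⟨p, hp, rfl⟩ := h
        have hpw : p = w := chase_unique d hp hw
        simp [chaseO, hpw]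
      · rw [PySem.Dict.get?_insert_of_ne _ _ hk]
        cases hgk : d.get? k with
        | none => rw [hgk] at h; simp at h
        | some val2 =>
          simp only [hgk, Option.map_eq_some_iff] at h ⊢
          obtain ⟨p, hp, rfl⟩ := h
          exact ⟨p, ih val2.2.2 p hp, rfl⟩

theorem setAbs_spec (keys0 : List String) (A0 : String → Option (Int × Int)) (len : Nat) :
    ∀ f d stop v, InvA keys0 A0 len d → chaseO d f (some stop) = some v →
      (setAbsDist f d stop).2 = (v.1, v.2, none) ∧
      A0 stop = some v ∧
      InvA keys0 A0 len (setAbsDist f d stop).1 ∧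
      (setAbsDist f d stop).1.get? stop = some (v.1, v.2, none) ∧
      (∀ k, (setAbsDist f d stop).1.get? k = d.get? k ∨
            ∃ u, A0 k = some u ∧ (setAbsDist f d stop).1.get? k = some (u.1, u.2, none)) := by
  intro f
  induction f with
  | zero => intro d stop v _ h; simp [chaseO] at h
  | succ f ih =>
    intro d stop v hInv h
    have h0 := h
    simp only [chaseO] at h
    cases hstop : d.get? stop with
    | none => rw [hstop] at h; simp at h
    | some val =>
      obtain ⟨a, b, src⟩ := val
      rw [hstop] at h
      simp only [Option.map_eq_some_iff] at h
      obtain ⟨p, hp, hv⟩ := h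
      subst hv
      have hstopmem : stop ∈ keys0 := by
        rw [← hInv.1]
        by_contra hn
        rw [(PySem.Dict.get?_eq_none_iff_not_mem_keys d stop).mpr hn] at hstop
        simp at hstop
      have hA0 : A0 stop = some (a + p.1, b + p.2) := by
        obtain ⟨v', hv', hch⟩ := hInv.2 stop hstopmem
        rw [hv', chase_unique d h0 hch]
      cases src with
      | none =>
        have hp0 : p = (0, 0) := by
          cases f <;> simpa [chaseO] using hp.symm
        subst hp0
        have hres : setAbsDist (f + 1) d stop = (d, (a, b, none)) := by
          simp [setAbsDist, hstop]
        refine ⟨by simp [hres], by simpa using hA0, by rw [hres]; exact hInv, ?_,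
          fun k => Or.inl (by rw [hres])⟩
        rw [hres]
        simpa using hstop
      | some s =>
        have hsmem : s ∈ keys0 := by
          rw [← hInv.1]
          by_contra hn
          have hnone : d.get? s = none := (PySem.Dict.get?_eq_none_iff_not_mem_keys d s).mpr hn
          cases f with
          | zero => simp [chaseO] at hp
          | succ f' => simp [chaseO, hnone] at hp
        obtain ⟨hr2, hA0s, hInvr, hgs, hpres⟩ := ih d s p hInv hp
        have hres : setAbsDist (f + 1) d stop =
            ((setAbsDist f d s).1.insert stop (a + p.1, b + p.2, none), (a + p.1, b + p.2, none)) := by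
          simp [setAbsDist, hstop, hr2]
        have hcontains : (setAbsDist f d s).1.contains stop = true := by
          rw [PySem.Dict.contains_iff_mem_keys, hInvr.1]; exact hstopmem
        -- every surviving chase is preserved by the final insert
        have hins : ∀ g s' v', chaseO (setAbsDist f d s).1 g s' = some v' →
            chaseO ((setAbsDist f d s).1.insert stop (a + p.1, b + p.2, none)) g s' = some v' := by
          intro g s' v' hch
          rcases hpres stop with hsame | ⟨u, hu, hu'⟩
          · -- stop still holds its original (a, b, some s); its chain in r.1 resolves to p
            obtain ⟨us, hA0s', hchs⟩ := hInvr.2 s hsmem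
            have hus : us = p := by rw [hA0s'] at hA0s; exact Option.some_inj.mp hA0s
            exact chase_insert (setAbsDist f d s).1 (val := (a, b, some s)) (w := p)
              (by rw [hsame, hstop]) (g := len + 1) (by simpa [hus] using hchs) g s' v' hch
          · -- stop was already rewritten to its absolute value (u = (a + p.1, b + p.2))
            have huv : u = (a + p.1, b + p.2) := by
              rw [hu] at hA0; exact Option.some_inj.mp hA0
            have := chase_insert (setAbsDist f d s).1 (val := (u.1, u.2, none)) (w := ((0 : Int), (0 : Int)))
              hu' (g := 0) rfl g s' v' hch
            simpa [huv] using this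
        refine ⟨by rw [hres], hA0, ?_, ?_, ?_⟩
        · -- invariant after the insert
          rw [hres]
          refine ⟨by rw [PySem.Dict.keys_insert_of_contains _ _ hcontains, hInvr.1], ?_⟩
          intro k hk
          obtain ⟨u, hu, hchu⟩ := hInvr.2 k hk
          exact ⟨u, hu, hins _ _ _ hchu⟩
        · rw [hres]; exact PySem.Dict.get?_insert_self _ _ _
        · intro k
          rw [hres]
          by_cases hk : k = stop
          · subst hk
            exact Or.inr ⟨(a + p.1, b + p.2), hA0, PySem.Dict.get?_insert_self _ _ _⟩
          · rw [PySem.Dict.get?_insert_of_ne _ _ hk]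
            exact hpres k

theorem loop_spec (keys0 : List String) (A0 : String → Option (Int × Int)) (len : Nat) :
    ∀ (stops : List String) d, InvA keys0 A0 len d → (∀ k ∈ stops, k ∈ keys0) →
      InvA keys0 A0 len (stops.foldl (fun d stop => (setAbsDist (len + 1) d stop).1) d) ∧
      (∀ k, (stops.foldl (fun d stop => (setAbsDist (len + 1) d stop).1) d).get? k = d.get? k ∨
            ∃ u, A0 k = some u ∧
              (stops.foldl (fun d stop => (setAbsDist (len + 1) d stop).1) d).get? k = some (u.1, u.2, none)) ∧
      (∀ k ∈ stops, ∃ u, A0 k = some u ∧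
              (stops.foldl (fun d stop => (setAbsDist (len + 1) d stop).1) d).get? k = some (u.1, u.2, none)) := by
  intro stops
  induction stops with
  | nil => intro d hInv _; exact ⟨hInv, fun k => Or.inl rfl, by simp⟩
  | cons stop stops ih =>
    intro d hInv hsub
    have hstopmem : stop ∈ keys0 := hsub stop (by simp)
    obtain ⟨v, hA0v, hch⟩ := hInv.2 stop hstopmem
    obtain ⟨-, -, hInv', hg', hpres'⟩ := setAbs_spec keys0 A0 len (len + 1) d stop v hInv hch
    obtain ⟨hInvF, hpresF, hdoneF⟩ :=
      ih (setAbsDist (len + 1) d stop).1 hInv' (fun k hk => hsub k (List.mem_cons_of_mem _ hk))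
    simp only [List.foldl_cons]
    refine ⟨hInvF, ?_, ?_⟩
    · intro k
      rcases hpresF k with heq | hr
      · rw [heq]; exact hpres' k
      · exact Or.inr hr
    · intro k hk
      rcases List.mem_cons.mp hk with rfl | hmem
      · rcases hpresF k with heq | hr
        · exact ⟨v, hA0v, by rw [heq]; exact hg'⟩
        · exact hr
      · exact hdoneF k hmem


-- the two outputs, entry by entry
theorem final_assembly (distances : List (String × Int × Int × Option String))
    (hnd : (distances.map (·.1)).Nodup)
    (hrooted : distances.all (fun e => rootedChain distances distances.length e.2.2.2) = true) :
    normalize_distances distances = normalize_distances_alt distances := by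
  have hall : ∀ e ∈ distances, rootedChain distances distances.length e.2.2.2 = true := by
    simpa [List.all_eq_true] using hrooted
  have hget0 : ∀ e ∈ distances, (PySem.Dict.mk distances).get? e.1 = some e.2 := by
    intro e he
    rw [get?_mk_find, find?_of_nodup distances hnd he]; rfl
  have hInv0 : InvA (distances.map (·.1))
      (fun k => chaseO (PySem.Dict.mk distances) (distances.length + 1) (some k))
      distances.length (PySem.Dict.mk distances) := by
    refine ⟨rfl, ?_⟩
    intro k hk
    obtain ⟨e, he, rfl⟩ := List.mem_map.mp hk
    obtain ⟨w, hw⟩ := rooted_chase distances distances.length e.2.2.2 (hall e he)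
    exact ⟨(e.2.1 + w.1, e.2.2.1 + w.2), by simp [chaseO, hget0 e he, hw],
           by simp [chaseO, hget0 e he, hw]⟩
  obtain ⟨hInvF, -, hdone⟩ := loop_spec (distances.map (·.1))
    (fun k => chaseO (PySem.Dict.mk distances) (distances.length + 1) (some k))
    distances.length (PySem.Dict.mk distances).keys (PySem.Dict.mk distances) hInv0
    (fun k hk => hk)
  have hndF := hInvF.1 ▸ hnd
  show ((PySem.Dict.mk distances).keys.foldl
      (fun d stop => (setAbsDist (distances.length + 1) d stop).1)
      (PySem.Dict.mk distances)).items = _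
  rw [PySem.Dict.items_eq_map_keys _ hndF ((0 : Int), (0 : Int), (none : Option String)),
    hInvF.1, List.map_map]
  show _ = distances.map _
  refine List.map_congr_left ?_
  intro e he
  obtain ⟨k, x, y, src⟩ := e
  obtain ⟨w, hw⟩ := rooted_chase distances distances.length _ (hall _ he)
  obtain ⟨u, hu, hgF⟩ := hdone k (List.mem_map_of_mem he)
  have hu' : u = (x + w.1, y + w.2) := by
    have : chaseO (PySem.Dict.mk distances) (distances.length + 1) (some k) =
        some (x + w.1, y + w.2) := by
      simp [chaseO, hget0 _ he, hw]
    rw [this] at hu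
    exact (Option.some_inj.mp hu).symm
  subst hu'
  rw [Function.comp_apply, PySem.Dict.getD_eq_get?_getD, hgF]
  cases hsrc : src with
  | none =>
    have hw0 : w = (0, 0) := by
      rw [hsrc] at hw
      cases distances.length <;> simpa [chaseO] using hw.symm
    subst hsrc
    simp [hw0]
  | some c =>
    subst hsrc
    simp only []
    rw [walk_chase distances distances.length (some c) w x y hw]
    rfl

-- ===== VERDICT (by name: the statement is the Claim_ definition above) =====
theorem normalize_distances_spec : Claim_equal_normalize_distances := by
  intro distances _ hPre
  unfold Spec_normalize_distances
  exact final_assembly distances hPre.1 hPre.2
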